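-- pv_equiv track=rewrite | github.com/jahnvisahni31/DailyCoding-GFG | Basic/Digits in a set/digits-in-a-set.py | countNumbers
-- ===== SOURCE A (Python) =====
-- def countNumbers(n):
--     # code here
--     count = 0
--     for i in range(1, n+1):
--         while i:
--             lastdigit = i%10
--             if lastdigit<1 or lastdigit>5:
--                 break
--             i //= 10
--
--         else:
--             count+=1
--
--     return count
-- ===== SOURCE B (Python) =====
-- def countNumbers(n):
--     # Recursive decomposition by last digit: a number with all digits in 1..5
--     # is d or 10*x+d with d in 1..5 and x itself such a number.
--     def cnt(m):
--         if m <= 0: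
--             return 0
--         r = 0
--         for d in (1, 2, 3, 4, 5):
--             if d <= m:
--                 r += 1
--             q = (m - d) // 10
--             if q > 0:
--                 r += cnt(q)
--         return r
--     return cnt(n)
-- ===== Notes on version B (the rewrite author's own statement) =====
-- stated objective: faster
-- what changed: A scans every integer 1..n and checks each one's digits; B recurses on the last digit, counting good numbers via count(m) = sum over d in 1..5 of [d <= m] + count((m-d)//10), so the work is a small recursion tree on m//10 instead of a linear scan.
import Mathlib
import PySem

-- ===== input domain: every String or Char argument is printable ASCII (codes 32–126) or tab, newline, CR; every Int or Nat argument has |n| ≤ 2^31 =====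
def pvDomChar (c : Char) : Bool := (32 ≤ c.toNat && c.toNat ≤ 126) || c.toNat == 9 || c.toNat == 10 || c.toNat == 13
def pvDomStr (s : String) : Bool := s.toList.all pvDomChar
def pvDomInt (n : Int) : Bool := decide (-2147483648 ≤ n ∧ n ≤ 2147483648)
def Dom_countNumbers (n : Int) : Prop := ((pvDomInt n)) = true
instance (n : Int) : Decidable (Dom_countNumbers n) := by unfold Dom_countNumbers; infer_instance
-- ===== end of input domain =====

-- B replaces A's brute-force scan of 1..n with a recursion on the last digit (count = Σ_{d=1..5} [d ≤ n] + cnt((n-d)//10)); objective: faster.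

-- ===== PORT A =====
-- the inner `while i: … else:` loop of A: true iff the while-loop ran to completion (no break)
def pvWhileDigits (i : Int) : Bool :=
  if _h : i = 0 then true
  else
    if PySem.Int.mod i 10 < 1 ∨ PySem.Int.mod i 10 > 5 then false
    else pvWhileDigits (PySem.Int.floordiv i 10)
termination_by i.natAbs
decreasing_by
  rename_i h2
  rw [PySem.Int.mod_eq_emod_of_pos (by omega)] at h2
  rw [PySem.Int.floordiv_eq_ediv_of_pos (by omega)]
  omega

def countNumbers (n : Int) : Int :=
  (PySem.List.pyRange 1 (n + 1) 1).foldl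
    (fun count i => if pvWhileDigits i then count + 1 else count) 0

-- ===== PORT B =====
-- B's inner helper `cnt`, with its tuple loop over d = 1,…,5 unrolled
def pvCnt (m : Int) : Int :=
  if _h : m ≤ 0 then 0
  else
    let r : Int := 0
    -- d = 1
    let r := r + (if (1 : Int) ≤ m then 1 else 0)
    let r := r + (if h1 : 0 < PySem.Int.floordiv (m - 1) 10 then pvCnt (PySem.Int.floordiv (m - 1) 10) else 0)
    -- d = 2
    let r := r + (if (2 : Int) ≤ m then 1 else 0)
    let r := r + (if h2 : 0 < PySem.Int.floordiv (m - 2) 10 then pvCnt (PySem.Int.floordiv (m - 2) 10) else 0)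
    -- d = 3
    let r := r + (if (3 : Int) ≤ m then 1 else 0)
    let r := r + (if h3 : 0 < PySem.Int.floordiv (m - 3) 10 then pvCnt (PySem.Int.floordiv (m - 3) 10) else 0)
    -- d = 4
    let r := r + (if (4 : Int) ≤ m then 1 else 0)
    let r := r + (if h4 : 0 < PySem.Int.floordiv (m - 4) 10 then pvCnt (PySem.Int.floordiv (m - 4) 10) else 0)
    -- d = 5
    let r := r + (if (5 : Int) ≤ m then 1 else 0)
    let r := r + (if h5 : 0 < PySem.Int.floordiv (m - 5) 10 then pvCnt (PySem.Int.floordiv (m - 5) 10) else 0)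
    r
termination_by m.natAbs
decreasing_by
  · rw [PySem.Int.floordiv_eq_ediv_of_pos (by omega)] at h1 ⊢; omega
  · rw [PySem.Int.floordiv_eq_ediv_of_pos (by omega)] at h2 ⊢; omega
  · rw [PySem.Int.floordiv_eq_ediv_of_pos (by omega)] at h3 ⊢; omega
  · rw [PySem.Int.floordiv_eq_ediv_of_pos (by omega)] at h4 ⊢; omega
  · rw [PySem.Int.floordiv_eq_ediv_of_pos (by omega)] at h5 ⊢; omega

def countNumbers_alt (n : Int) : Int := pvCnt n

-- ===== PRECONDITION & SPEC =====
def Spec_countNumbers (n : Int) (out : Int) : Prop := out = countNumbers_alt n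
instance (n : Int) (out : Int) : Decidable (Spec_countNumbers n out) := by unfold Spec_countNumbers; infer_instance

-- ===== CLAIM (what is proved, stated in full; the proofs are below) =====
def Claim_equal_countNumbers : Prop := ∀ (n : Int), Dom_countNumbers n → Spec_countNumbers n (countNumbers n)

-- ===== LEMMAS AND PROOFS =====

theorem pvCnt_nonpos {m : Int} (h : m ≤ 0) : pvCnt m = 0 := by
  unfold pvCnt; simp [h]

-- closed form of one unfolding of pvCnt, with floordiv turned into ediv
theorem pvCnt_pos {m : Int} (h : 1 ≤ m) :
    pvCnt m =
      ((if (1 : Int) ≤ m then 1 else 0) + (if 0 < (m - 1) / 10 then pvCnt ((m - 1) / 10) else 0))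
      + ((if (2 : Int) ≤ m then 1 else 0) + (if 0 < (m - 2) / 10 then pvCnt ((m - 2) / 10) else 0))
      + ((if (3 : Int) ≤ m then 1 else 0) + (if 0 < (m - 3) / 10 then pvCnt ((m - 3) / 10) else 0))
      + ((if (4 : Int) ≤ m then 1 else 0) + (if 0 < (m - 4) / 10 then pvCnt ((m - 4) / 10) else 0))
      + ((if (5 : Int) ≤ m then 1 else 0) + (if 0 < (m - 5) / 10 then pvCnt ((m - 5) / 10) else 0)) := by
  conv_lhs => rw [pvCnt]
  rw [dif_neg (by omega : ¬ m ≤ 0)]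
  simp only [PySem.Int.floordiv_eq_ediv_of_pos (by omega : (0:Int) < 10), dite_eq_ite]
  ring

-- one step of the while-loop for nonzero i, with mod/floordiv turned into emod/ediv
theorem pvWhileDigits_step {i : Int} (h : i ≠ 0) :
    pvWhileDigits i =
      (if i % 10 < 1 ∨ i % 10 > 5 then false else pvWhileDigits (i / 10)) := by
  conv_lhs => rw [pvWhileDigits]
  rw [dif_neg h,
      PySem.Int.mod_eq_emod_of_pos (by omega),
      PySem.Int.floordiv_eq_ediv_of_pos (by omega)]

-- the while-loop accepts i = 0 (loop body never runs)
theorem pvWhileDigits_zero : pvWhileDigits 0 = true := by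
  rw [pvWhileDigits]; simp

-- key lemma: pvCnt steps by the good-number indicator
theorem pvCnt_diff : ∀ (k : Nat) (m : Int), 1 ≤ m → m.toNat ≤ k →
    pvCnt m = pvCnt (m - 1) + (if pvWhileDigits m then 1 else 0) := by
  intro k
  induction k with
  | zero => intro m hm hk; omega
  | succ k ih =>
    intro m hm _hk
    rcases le_or_gt m 5 with h5 | h5
    · -- 1 ≤ m ≤ 5 : m itself is good, no recursive contributions
      have hgood : pvWhileDigits m = true := by
        rw [pvWhileDigits_step (by omega), if_neg (by omega),
            (show m / 10 = 0 by omega), pvWhileDigits_zero]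
      rw [hgood, if_pos rfl]
      rcases eq_or_lt_of_le hm with h1 | h1
      · -- m = 1
        rw [pvCnt_pos hm]
        have gz1 : (if 0 < (m-1)/10 then pvCnt ((m-1)/10) else 0) = 0 := if_neg (by omega)
        have gz2 : (if 0 < (m-2)/10 then pvCnt ((m-2)/10) else 0) = 0 := if_neg (by omega)
        have gz3 : (if 0 < (m-3)/10 then pvCnt ((m-3)/10) else 0) = 0 := if_neg (by omega)
        have gz4 : (if 0 < (m-4)/10 then pvCnt ((m-4)/10) else 0) = 0 := if_neg (by omega)
        have gz5 : (if 0 < (m-5)/10 then pvCnt ((m-5)/10) else 0) = 0 := if_neg (by omega)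
        rw [gz1, gz2, gz3, gz4, gz5, pvCnt_nonpos (by omega : m - 1 ≤ 0)]
        split_ifs <;> omega
      · -- 2 ≤ m ≤ 5
        rw [pvCnt_pos hm, pvCnt_pos (m := m - 1) (by omega)]
        have e1 : m - 1 - 1 = m - 2 := by ring
        have e2 : m - 1 - 2 = m - 3 := by ring
        have e3 : m - 1 - 3 = m - 4 := by ring
        have e4 : m - 1 - 4 = m - 5 := by ring
        have e5 : m - 1 - 5 = m - 6 := by ring
        rw [e1, e2, e3, e4, e5]
        have gz1 : (if 0 < (m-1)/10 then pvCnt ((m-1)/10) else 0) = 0 := if_neg (by omega)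
        have gz2 : (if 0 < (m-2)/10 then pvCnt ((m-2)/10) else 0) = 0 := if_neg (by omega)
        have gz3 : (if 0 < (m-3)/10 then pvCnt ((m-3)/10) else 0) = 0 := if_neg (by omega)
        have gz4 : (if 0 < (m-4)/10 then pvCnt ((m-4)/10) else 0) = 0 := if_neg (by omega)
        have gz5 : (if 0 < (m-5)/10 then pvCnt ((m-5)/10) else 0) = 0 := if_neg (by omega)
        have gz6 : (if 0 < (m-6)/10 then pvCnt ((m-6)/10) else 0) = 0 := if_neg (by omega)
        rw [gz1, gz2, gz3, gz4, gz5, gz6]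
        split_ifs <;> omega
    · -- m ≥ 6 : units-digit contributions agree, recursive terms telescope
      rw [pvCnt_pos hm, pvCnt_pos (m := m - 1) (by omega)]
      have e1 : m - 1 - 1 = m - 2 := by ring
      have e2 : m - 1 - 2 = m - 3 := by ring
      have e3 : m - 1 - 3 = m - 4 := by ring
      have e4 : m - 1 - 4 = m - 5 := by ring
      have e5 : m - 1 - 5 = m - 6 := by ring
      rw [e1, e2, e3, e4, e5]
      have c1 : (if (1:Int) ≤ m then (1:Int) else 0) = 1 := if_pos (by omega)
      have c2 : (if (2:Int) ≤ m then (1:Int) else 0) = 1 := if_pos (by omega)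
      have c3 : (if (3:Int) ≤ m then (1:Int) else 0) = 1 := if_pos (by omega)
      have c4 : (if (4:Int) ≤ m then (1:Int) else 0) = 1 := if_pos (by omega)
      have c5 : (if (5:Int) ≤ m then (1:Int) else 0) = 1 := if_pos (by omega)
      have c1' : (if (1:Int) ≤ m - 1 then (1:Int) else 0) = 1 := if_pos (by omega)
      have c2' : (if (2:Int) ≤ m - 1 then (1:Int) else 0) = 1 := if_pos (by omega)
      have c3' : (if (3:Int) ≤ m - 1 then (1:Int) else 0) = 1 := if_pos (by omega)
      have c4' : (if (4:Int) ≤ m - 1 then (1:Int) else 0) = 1 := if_pos (by omega)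
      have c5' : (if (5:Int) ≤ m - 1 then (1:Int) else 0) = 1 := if_pos (by omega)
      rw [c1, c2, c3, c4, c5, c1', c2', c3', c4', c5']
      by_cases hdig : 1 ≤ m % 10 ∧ m % 10 ≤ 5
      · -- units digit of m is in 1..5
        have hqpos : 1 ≤ m / 10 := by omega
        have hq1 : (m - 1) / 10 = m / 10 := by omega
        have hq6 : (m - 6) / 10 = m / 10 - 1 := by omega
        rw [hq1, hq6]
        have hgood : pvWhileDigits m = pvWhileDigits (m / 10) := by
          rw [pvWhileDigits_step (by omega), if_neg (by omega)]
        have hGq : (if 0 < m / 10 then pvCnt (m / 10) else 0) = pvCnt (m / 10) :=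
          if_pos (by omega)
        have hGq1 : (if 0 < m / 10 - 1 then pvCnt (m / 10 - 1) else 0) = pvCnt (m / 10 - 1) := by
          by_cases hq' : 0 < m / 10 - 1
          · rw [if_pos hq']
          · rw [if_neg hq', pvCnt_nonpos (by omega)]
        rw [hGq, hGq1, hgood, ih (m / 10) hqpos (by omega)]
        ring
      · -- units digit of m is 0 or 6..9 : m and nothing new is good
        have hbad : pvWhileDigits m = false := by
          rw [pvWhileDigits_step (by omega), if_pos (by omega)]
        have hq16 : (m - 1) / 10 = (m - 6) / 10 := by omega
        rw [hq16, hbad]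
        simp only [Bool.false_eq_true, if_false]
        ring

-- peel the last element off A's range
theorem countNumbers_succ {m : Int} (h : 1 ≤ m) :
    countNumbers m = countNumbers (m - 1) + (if pvWhileDigits m then 1 else 0) := by
  unfold countNumbers
  have : m - 1 + 1 = m := by ring
  rw [this]
  have hsplit : PySem.List.pyRange 1 (m + 1) 1 = PySem.List.pyRange 1 m 1 ++ [m] := by
    simpa using PySem.List.pyRange_one_succ_right h
  rw [hsplit, List.foldl_append]
  simp only [List.foldl_cons, List.foldl_nil]
  split_ifs <;> ring

theorem countNumbers_nonpos {n : Int} (h : n ≤ 0) : countNumbers n = 0 := by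
  unfold countNumbers
  rw [PySem.List.pyRange_one_eq_nil (by omega)]
  rfl

theorem countNumbers_eq_alt : ∀ (k : Nat) (n : Int), n.toNat ≤ k → countNumbers n = pvCnt n := by
  intro k
  induction k with
  | zero =>
    intro n hk
    rw [countNumbers_nonpos (by omega), pvCnt_nonpos (by omega)]
  | succ k ih =>
    intro n hk
    rcases le_or_gt n 0 with h | h
    · rw [countNumbers_nonpos h, pvCnt_nonpos h]
    · rw [countNumbers_succ h, pvCnt_diff n.toNat n h le_rfl,
          ih (n - 1) (by omega)]

-- ===== VERDICT (by name: the statement is the Claim_ definition above) =====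
theorem countNumbers_spec : Claim_equal_countNumbers := by
  intro n _
  unfold Spec_countNumbers countNumbers_alt
  exact countNumbers_eq_alt n.toNat n le_rfl
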